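-- pv_equiv track=rewrite | github.com/MariuszAKS/AdventOfCode2024 | day_15.py | try_push_crates_horizontally
-- ===== SOURCE A (Python) =====
-- def try_push_crates_horizontally(warehouse_map, position, direction):
--     if warehouse_map[position[0]][position[1]] == '#':
--         return False
--     elif warehouse_map[position[0]][position[1]] == '.':
--         return True
--
--     new_position = [position[0], position[1] + direction]
--     can_push = try_push_crates_horizontally(warehouse_map, new_position, direction)
--
--     if can_push:
--         warehouse_map[new_position[0]][new_position[1]] = warehouse_map[position[0]][position[1]]
--         warehouse_map[position[0]][position[1]] = '.'
--
--     return can_push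
-- ===== SOURCE B (Python) =====
-- def try_push_crates_horizontally(warehouse_map, position, direction):
--     # Iterative two-phase version: scan for a wall/empty cell, then shift the
--     # crates back-to-front.  Same in-place mutation as the recursive original.
--     row = warehouse_map[position[0]]
--     start = position[1]
--     first = row[start]
--     if first == '#':
--         return False
--     if first == '.':
--         return True
--     n = 1
--     while True:
--         cell = row[start + n * direction]
--         if cell == '#':
--             return False
--         if cell == '.':
--             break
--         n += 1
--     for k in range(n, 0, -1):
--         row[start + k * direction] = row[start + (k - 1) * direction]
--     row[start] = '.'
--     return True
-- ===== Notes on version B (the rewrite author's own statement) =====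
-- stated objective: alternative
-- what changed: Replaces A's recursion (push one crate per call, mutate while unwinding) by an iterative two-phase version: one loop scans forward from the start column until it hits a wall or an empty cell, then a second loop shifts the crates back-to-front; B performs the same in-place mutation as A, and the Lean equivalence is about the return value (A's recursion depth is traded for a flat loop, cost is otherwise the same O(n) scan).
import Mathlib
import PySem

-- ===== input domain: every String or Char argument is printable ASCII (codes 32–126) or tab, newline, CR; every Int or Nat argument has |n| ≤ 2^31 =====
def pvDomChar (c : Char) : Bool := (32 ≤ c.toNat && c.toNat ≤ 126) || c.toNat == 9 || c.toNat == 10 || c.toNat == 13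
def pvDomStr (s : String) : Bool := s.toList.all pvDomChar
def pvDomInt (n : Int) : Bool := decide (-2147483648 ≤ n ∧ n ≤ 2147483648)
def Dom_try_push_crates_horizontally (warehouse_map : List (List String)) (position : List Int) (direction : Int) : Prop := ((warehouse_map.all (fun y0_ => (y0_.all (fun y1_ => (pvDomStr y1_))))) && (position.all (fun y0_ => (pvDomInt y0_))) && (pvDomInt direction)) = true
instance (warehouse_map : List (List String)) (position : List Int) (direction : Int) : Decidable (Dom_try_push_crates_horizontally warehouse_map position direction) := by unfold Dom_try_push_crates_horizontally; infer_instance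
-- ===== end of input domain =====

-- B replaces A's recursion by an iterative two-phase scan-then-shift loop (an alternative
-- decomposition, similar cost); A and B mutate warehouse_map identically, but the
-- equivalence proved here is about the RETURN value only.

-- ===== PORT A =====
-- A's recursion advances position[1] by direction each level; the fuel argument only
-- makes the non-structural recursion total (fuel exhaustion = Python's RecursionError,
-- excluded by Pre_; the mutation on the success path does not affect A's return value,
-- since all reads happen on the way down).
def pvGoA (warehouse_map : List (List String)) (r c direction : Int) : Nat → Bool
  | 0 => false
  | fuel + 1 =>
    match (PySem.List.pyGet? warehouse_map r).bind (fun row => PySem.List.pyGet? row c) with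
    | none => false      -- IndexError in Python, excluded by Pre_
    | some cell =>
      if cell == "#" then false
      else if cell == "." then true
      else pvGoA warehouse_map r (c + direction) direction fuel

def try_push_crates_horizontally (warehouse_map : List (List String)) (position : List Int) (direction : Int) : Bool :=
  match PySem.List.pyGet? position 0, PySem.List.pyGet? position 1 with
  | some r, some c =>
      pvGoA warehouse_map r c direction
        (2 * ((PySem.List.pyGet? warehouse_map r).elim 0 List.length) + 1)
  | _, _ => false        -- IndexError in Python, excluded by Pre_

-- ===== PORT B =====
-- Source B's while-loop: keep the start column fixed and probe start + n*direction.
-- The subsequent in-place shift loop of Source B does not affect the returned Bool.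
def pvLoopB (row : List String) (start direction : Int) : Int → Nat → Bool
  | _, 0 => false
  | n, fuel + 1 =>
    match PySem.List.pyGet? row (start + n * direction) with
    | none => false      -- IndexError in Python, excluded by Pre_
    | some cell =>
      if cell == "#" then false
      else if cell == "." then true
      else pvLoopB row start direction (n + 1) fuel

def try_push_crates_horizontally_alt (warehouse_map : List (List String)) (position : List Int) (direction : Int) : Bool :=
  match PySem.List.pyGet? position 0 with
  | none => false
  | some ri =>
    match PySem.List.pyGet? warehouse_map ri with
    | none => false
    | some row =>
      match PySem.List.pyGet? position 1 with
      | none => false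
      | some start =>
        match PySem.List.pyGet? row start with
        | none => false
        | some first =>
          if first == "#" then false
          else if first == "." then true
          else pvLoopB row start direction 1 (2 * row.length)

-- ===== PRECONDITION & SPEC =====
-- Cell read by the k-th step of the push scan (none = Python IndexError).
def pvCellAt (warehouse_map : List (List String)) (position : List Int) (direction : Int) (k : Nat) : Option String :=
  (PySem.List.pyGet? position 0).bind fun r =>
    (PySem.List.pyGet? position 1).bind fun c =>
      (PySem.List.pyGet? warehouse_map r).bind fun row =>
        PySem.List.pyGet? row (c + (k : Int) * direction)

def pvRowLen (warehouse_map : List (List String)) (position : List Int) : Nat :=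
  ((PySem.List.pyGet? position 0).bind fun r => PySem.List.pyGet? warehouse_map r).elim 0 List.length

def pvIsCrate (o : Option String) : Bool :=
  match o with
  | some s => s ≠ "#" && s ≠ "."
  | none => false

def pvIsStop (o : Option String) : Bool := o == some "#" || o == some "."

-- Pre_ = exactly the inputs on which Python A returns (no IndexError, no RecursionError):
-- the scan from position[1] reaches a '#' or '.' cell after some crates, all reads in range.
-- (Any terminating scan stops within 2*rowlen steps, since a row of length L admits only
-- the 2L indices -L..L-1 and, for direction ≠ 0, the probed indices are pairwise distinct.)
def Pre_try_push_crates_horizontally (warehouse_map : List (List String)) (position : List Int) (direction : Int) : Prop :=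
  ∃ n < 2 * pvRowLen warehouse_map position + 1,
    (∀ k < n, pvIsCrate (pvCellAt warehouse_map position direction k) = true) ∧
    pvIsStop (pvCellAt warehouse_map position direction n) = true

instance (warehouse_map : List (List String)) (position : List Int) (direction : Int) : Decidable (Pre_try_push_crates_horizontally warehouse_map position direction) := by
  unfold Pre_try_push_crates_horizontally; infer_instance

def pvWitness_try_push_crates_horizontally : List (List String) × List Int × Int :=
  ([["#", "O", "O", ".", "#"]], [0, 1], 1)

def Spec_try_push_crates_horizontally (warehouse_map : List (List String)) (position : List Int) (direction : Int) (out : Bool) : Prop := out = try_push_crates_horizontally_alt warehouse_map position direction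
instance (warehouse_map : List (List String)) (position : List Int) (direction : Int) (out : Bool) : Decidable (Spec_try_push_crates_horizontally warehouse_map position direction out) := by unfold Spec_try_push_crates_horizontally; infer_instance

-- ===== CLAIM (what is proved, stated in full; the proofs are below) =====
def Claim_equal_try_push_crates_horizontally : Prop := ∀ (warehouse_map : List (List String)) (position : List Int) (direction : Int), Dom_try_push_crates_horizontally warehouse_map position direction → Pre_try_push_crates_horizontally warehouse_map position direction → Spec_try_push_crates_horizontally warehouse_map position direction (try_push_crates_horizontally warehouse_map position direction)

-- ===== LEMMAS AND PROOFS =====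

-- A's recursion, given a crate path of length n ending at a stop cell and enough fuel,
-- answers "is the stop cell '.'".
theorem pvGoA_path (warehouse_map : List (List String)) (r direction : Int) (row : List String)
    (hrow : PySem.List.pyGet? warehouse_map r = some row) :
    ∀ (n : Nat) (c : Int) (fuel : Nat), n < fuel →
    (∀ k < n, pvIsCrate (PySem.List.pyGet? row (c + (k : Int) * direction)) = true) →
    pvIsStop (PySem.List.pyGet? row (c + (n : Int) * direction)) = true →
    pvGoA warehouse_map r c direction fuel
      = (PySem.List.pyGet? row (c + (n : Int) * direction) == some ".") := by
  intro n
  induction n with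
  | zero =>
    intro c fuel hf _ hstop
    obtain ⟨fuel, rfl⟩ : ∃ f, fuel = f + 1 := ⟨fuel - 1, by omega⟩
    simp only [Int.natCast_zero, Int.zero_mul, Int.add_zero] at hstop ⊢
    rcases o : PySem.List.pyGet? row c with _ | s
    · simp [o, pvIsStop] at hstop
    · simp only [pvIsStop, o] at hstop
      rcases (by simpa using hstop : s = "#" ∨ s = ".") with rfl | rfl <;>
        simp [pvGoA, hrow, o]
  | succ m ih =>
    intro c fuel hf hcrate hstop
    obtain ⟨fuel, rfl⟩ : ∃ f, fuel = f + 1 := ⟨fuel - 1, by omega⟩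
    have h0 : pvIsCrate (PySem.List.pyGet? row (c + (0 : Int) * direction)) = true :=
      hcrate 0 (Nat.succ_pos m)
    simp only [Int.natCast_zero, Int.zero_mul, Int.add_zero] at h0
    rcases o : PySem.List.pyGet? row c with _ | s
    · simp [o, pvIsCrate] at h0
    · simp only [pvIsCrate, o, Bool.and_eq_true, decide_eq_true_eq, ne_eq] at h0
      have step : ∀ k : Int, (c + direction) + k * direction = c + (k + 1) * direction := by
        intro k; ring
      have hrec := ih (c + direction) fuel (by omega)
        (fun k hk => by
          have := hcrate (k + 1) (by omega)
          rw [step]; push_cast at this ⊢; convert this using 3 <;> ring)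
        (by
          rw [step]; push_cast at hstop ⊢; convert hstop using 3 <;> ring)
      rw [step] at hrec
      have : pvGoA warehouse_map r c direction (fuel + 1)
          = pvGoA warehouse_map r (c + direction) direction fuel := by
        simp [pvGoA, hrow, o, h0.1, h0.2]
      rw [this, hrec]
      push_cast; ring_nf

-- B's loop from step m (1 ≤ m ≤ n), given the crate path ends at step n with a stop cell
-- and enough fuel, answers the same.
theorem pvLoopB_path (row : List String) (start direction : Int) (n : Nat)
    (hcrate : ∀ k < n, pvIsCrate (PySem.List.pyGet? row (start + (k : Int) * direction)) = true)
    (hstop : pvIsStop (PySem.List.pyGet? row (start + (n : Int) * direction)) = true) :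
    ∀ (fuel m : Nat), m ≤ n → n - m < fuel →
    pvLoopB row start direction (m : Int) fuel
      = (PySem.List.pyGet? row (start + (n : Int) * direction) == some ".") := by
  intro fuel
  induction fuel with
  | zero => intro m _ h; omega
  | succ f ih =>
    intro m hm hf
    by_cases hmn : m = n
    · subst hmn
      rcases o : PySem.List.pyGet? row (start + (m : Int) * direction) with _ | s
      · simp [o, pvIsStop] at hstop
      · simp only [pvIsStop, o] at hstop
        rcases (by simpa using hstop : s = "#" ∨ s = ".") with rfl | rfl <;>
          simp [pvLoopB, o]
    · have hmn' : m < n := by omega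
      have hc := hcrate m hmn'
      rcases o : PySem.List.pyGet? row (start + (m : Int) * direction) with _ | s
      · simp [o, pvIsCrate] at hc
      · simp only [pvIsCrate, o, Bool.and_eq_true, decide_eq_true_eq, ne_eq] at hc
        have : pvLoopB row start direction (m : Int) (f + 1)
            = pvLoopB row start direction ((m : Int) + 1) f := by
          simp [pvLoopB, o, hc.1, hc.2]
        rw [this]
        have := ih (m + 1) (by omega) (by omega)
        simpa using this

-- ===== VERDICT (by name: the statement is the Claim_ definition above) =====
theorem try_push_crates_horizontally_spec : Claim_equal_try_push_crates_horizontally := by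
  intro warehouse_map position direction _ hpre
  obtain ⟨n, hn, hcrate, hstop⟩ := hpre
  unfold Spec_try_push_crates_horizontally
  rcases h0 : PySem.List.pyGet? position 0 with _ | r
  · simp [pvCellAt, h0, pvIsStop] at hstop
  rcases h1 : PySem.List.pyGet? position 1 with _ | c
  · simp [pvCellAt, h0, h1, pvIsStop] at hstop
  rcases hr : PySem.List.pyGet? warehouse_map r with _ | row
  · simp [pvCellAt, h0, h1, hr, pvIsStop] at hstop
  simp only [pvCellAt, h0, h1, hr, Option.bind_some] at hcrate hstop
  have hlen : pvRowLen warehouse_map position = row.length := by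
    simp [pvRowLen, h0, hr]
  rw [hlen] at hn
  -- A's side
  have hA : try_push_crates_horizontally warehouse_map position direction
      = (PySem.List.pyGet? row (c + (n : Int) * direction) == some ".") := by
    unfold try_push_crates_horizontally
    rw [h0, h1]
    simp only [hr, Option.elim_some]
    exact pvGoA_path warehouse_map r direction row hr n c _ (by omega) hcrate hstop
  -- B's side
  rcases hcell0 : PySem.List.pyGet? row c with _ | first
  · rcases n with _ | m
    · simp only [Int.natCast_zero, Int.zero_mul, Int.add_zero] at hstop
      simp [hcell0, pvIsStop] at hstop
    · have := hcrate 0 (Nat.succ_pos m)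
      simp only [Int.natCast_zero, Int.zero_mul, Int.add_zero] at this
      simp [hcell0, pvIsCrate] at this
  have hB : try_push_crates_horizontally_alt warehouse_map position direction
      = (if first == "#" then false else if first == "." then true
         else pvLoopB row c direction 1 (2 * row.length)) := by
    unfold try_push_crates_horizontally_alt
    rw [h0]
    simp only [hr, h1, hcell0]
  rcases n with _ | m
  · -- scan stops immediately: first is '#' or '.'
    simp only [Int.natCast_zero, Int.zero_mul, Int.add_zero] at hstop hA
    simp only [pvIsStop, hcell0] at hstop
    rcases (by simpa using hstop : first = "#" ∨ first = ".") with rfl | rfl <;>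
      simp [hA, hB, hcell0]
  · -- first is a crate: B takes the loop branch
    have hc0 := hcrate 0 (Nat.succ_pos m)
    simp only [Int.natCast_zero, Int.zero_mul, Int.add_zero] at hc0
    simp only [pvIsCrate, hcell0, Bool.and_eq_true, decide_eq_true_eq, ne_eq] at hc0
    have hloop := pvLoopB_path row c direction (m + 1) hcrate hstop (2 * row.length) 1
      (by omega) (by omega)
    rw [hA, hB]
    simp only [hc0.1, hc0.2, if_neg, beq_iff_eq]
    rw [if_neg (by simpa using hc0.1), if_neg (by simpa using hc0.2)]
    simpa using hloop.symm
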